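-- pv_equiv track=rewrite | github.com/Desmazing/kata-training | divisibility_rule.py | thirt
-- ===== SOURCE A (Python) =====
-- lst = [1,10,9,12,3,4]
--
-- def thirt(n):
--     """complete solution
--     need to acquaint with recursion a lot more"""
--     strn = str(n)[::-1]
--     output = 0
--     for i in range(len(strn)):
--         output += int(strn[i]) * lst[i % 6]
--     if n == output:
--         return output
--     else:
--         return thirt(output)
-- ===== SOURCE B (Python) =====
-- def thirt(n):
--     """Iterative fixed-point loop; digits extracted arithmetically with divmod
--     instead of string reversal."""
--     weights = (1, 10, 9, 12, 3, 4)
--     while True: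
--         total = 0
--         m = n
--         i = 0
--         while m > 0:
--             m, d = divmod(m, 10)
--             total += d * weights[i % 6]
--             i += 1
--         if total == n:
--             return total
--         n = total
-- ===== Notes on version B (the rewrite author's own statement) =====
-- stated objective: alternative
-- what changed: Replaces A's tail recursion over the reversed decimal string str(n)[::-1] with an iterative while-True fixed-point loop whose inner loop extracts digits arithmetically via divmod(m, 10), so no string is ever built.
import Mathlib
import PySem

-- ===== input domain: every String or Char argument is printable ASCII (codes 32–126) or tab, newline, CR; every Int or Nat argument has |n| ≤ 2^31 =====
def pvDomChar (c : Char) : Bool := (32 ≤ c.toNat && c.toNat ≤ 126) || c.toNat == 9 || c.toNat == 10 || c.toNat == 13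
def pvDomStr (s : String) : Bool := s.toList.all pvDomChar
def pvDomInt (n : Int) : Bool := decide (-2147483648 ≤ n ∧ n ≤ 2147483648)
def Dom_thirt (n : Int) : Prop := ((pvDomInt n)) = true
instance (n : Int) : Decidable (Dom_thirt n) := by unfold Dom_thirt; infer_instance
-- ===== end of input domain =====

-- B replaces A's recursion over str(n)[::-1] by an iterative fixed-point loop that
-- extracts digits arithmetically with divmod (objective: alternative decomposition).

-- ===== PORT A =====
def lstA : List Int := [1, 10, 9, 12, 3, 4]

-- output = 0; for i in range(len(strn)): output += int(strn[i]) * lst[i % 6]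
def thirtStep (n : Int) : Int :=
  let strn := (PySem.Int.toChars n).reverse
  (PySem.List.pyRange 0 (PySem.List.len strn) 1).foldl
    (fun output i =>
      output + (PySem.Int.ofChars? [PySem.List.pyGetD strn i ' ']).getD 0 *
        PySem.List.pyGetD lstA (PySem.Int.mod i 6) 0) 0

-- the tail recursion of A; the Nat argument is a fuel guard for totality only
def thirtLoop : Nat → Int → Int
  | 0, n => n
  | f + 1, n =>
    let output := thirtStep n
    if n = output then output else thirtLoop f output

def thirt (n : Int) : Int := thirtLoop (n.toNat + 1) n

-- ===== PORT B =====
def weightsB : List Int := [1, 10, 9, 12, 3, 4]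

-- while m > 0: m, d = divmod(m, 10); total += d * weights[i % 6]; i += 1
def innerB (m total i : Int) : Int :=
  if h : 0 < m then
    innerB (PySem.Int.floordiv m 10)
      (total + PySem.Int.mod m 10 * PySem.List.pyGetD weightsB (PySem.Int.mod i 6) 0)
      (i + 1)
  else total
termination_by m.toNat
decreasing_by
  have h10 : PySem.Int.floordiv m 10 = m / 10 := PySem.Int.floordiv_eq_ediv_of_pos (by norm_num)
  rw [h10]; omega

-- the 'while True' loop of B; the Nat argument is a fuel guard for totality only
def thirtLoopB : Nat → Int → Int
  | 0, n => n
  | f + 1, n =>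
    let total := innerB n 0 0
    if total = n then total else thirtLoopB f total

def thirt_alt (n : Int) : Int := thirtLoopB (n.toNat + 1) n

-- ===== PRECONDITION & SPEC =====
-- Pre_ excludes negative n: there str(n) contains '-' and int('-') raises ValueError in A.
def Pre_thirt (n : Int) : Prop := 0 ≤ n
instance (n : Int) : Decidable (Pre_thirt n) := by unfold Pre_thirt; infer_instance
def pvWitness_thirt : Int := 1234

def Spec_thirt (n : Int) (out : Int) : Prop := out = thirt_alt n
instance (n : Int) (out : Int) : Decidable (Spec_thirt n out) := by unfold Spec_thirt; infer_instance

-- ===== CLAIM (what is proved, stated in full; the proofs are below) =====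
def Claim_equal_thirt : Prop := ∀ (n : Int), Dom_thirt n → Pre_thirt n → Spec_thirt n (thirt n)

-- ===== LEMMAS AND PROOFS =====

-- weight at position k (both tables are the same literal list)
def wfn (k : Int) : Int := PySem.List.pyGetD lstA (PySem.Int.mod k 6) 0

lemma wfn_nonneg (k : Int) : 0 ≤ wfn k := by
  have h1 : 0 ≤ PySem.Int.mod k 6 := PySem.Int.mod_nonneg k (by norm_num)
  have h2 : PySem.Int.mod k 6 < 6 := PySem.Int.mod_lt k (by norm_num)
  unfold wfn
  set j := PySem.Int.mod k 6 with hj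
  interval_cases j <;> decide

-- pure little-endian weighted digit sum, the common core of both steps
def sB (m : Nat) (k : Int) : Int :=
  if m = 0 then 0 else (m % 10 : Nat) * wfn k + sB (m / 10) (k + 1)
decreasing_by omega

lemma sB_nonneg (m : Nat) (k : Int) : 0 ≤ sB m k := by
  induction m using Nat.strong_induction_on generalizing k with
  | _ m ih =>
    rw [sB]
    split
    · exact le_refl 0
    · rename_i hm
      have := ih (m / 10) (by omega) (k + 1)
      have hw := wfn_nonneg k
      positivity

lemma parseDigit (d : Nat) (hd : d < 10) :
    PySem.Int.ofChars? [Nat.digitChar d] = some (d : Int) := by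
  interval_cases d <;> decide

-- weighted sum over a char list starting at weight position k
def wA : List Char → Int → Int
  | [], _ => 0
  | c :: cs, k => (PySem.Int.ofChars? [c]).getD 0 * wfn k + wA cs (k + 1)

lemma sum_enumerate_eq_wA (cs : List Char) (s : Int) :
    ((PySem.List.enumerate cs s).map
      (fun p => (PySem.Int.ofChars? [p.2]).getD 0 * wfn p.1)).sum = wA cs s := by
  induction cs generalizing s with
  | nil => simp [wA, PySem.List.enumerate_nil]
  | cons c cs ih => simp [wA, PySem.List.enumerate_cons, ih]

lemma wA_toDigits (m : Nat) (k : Int) :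
    wA ((Nat.toDigits 10 m).reverse) k = sB m k := by
  induction m using Nat.strong_induction_on generalizing k with
  | _ m ih =>
    by_cases hm : m < 10
    · rw [Nat.toDigits_of_lt_base hm]
      rw [sB]
      simp only [List.reverse_singleton, wA, parseDigit m hm]
      by_cases h0 : m = 0
      · subst h0; simp
      · rw [if_neg h0, Nat.mod_eq_of_lt hm, Nat.div_eq_of_lt hm]
        rw [sB]
        simp
    · rw [Nat.toDigits_eq_if (by norm_num : 1 < 10), if_neg hm]
      rw [List.reverse_append, List.reverse_singleton, List.singleton_append]
      rw [wA]
      rw [parseDigit (m % 10) (Nat.mod_lt m (by norm_num))]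
      rw [ih (m / 10) (by omega) (k + 1)]
      conv_rhs => rw [sB]
      rw [if_neg (by omega)]
      rfl

lemma thirtStep_eq_sB (n : Int) (hn : 0 ≤ n) : thirtStep n = sB n.toNat 0 := by
  unfold thirtStep
  have htc : PySem.Int.toChars n = Nat.toDigits 10 n.toNat := by
    unfold PySem.Int.toChars
    rw [if_neg (by omega)]
  rw [htc]
  set strn := (Nat.toDigits 10 n.toNat).reverse with hs
  rw [PySem.List.foldl_add]
  have hmap : (PySem.List.pyRange 0 (PySem.List.len strn) 1).map
      (fun i => (PySem.Int.ofChars? [PySem.List.pyGetD strn i ' ']).getD 0 *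
        PySem.List.pyGetD lstA (PySem.Int.mod i 6) 0)
      = (PySem.List.enumerate strn 0).map
        (fun p => (PySem.Int.ofChars? [p.2]).getD 0 * wfn p.1) := by
    rw [PySem.List.enumerate_eq_map_pyRange strn ' ']
    rw [List.map_map]
    rfl
  rw [hmap, sum_enumerate_eq_wA, wA_toDigits]
  simp

lemma innerB_spec (m total i : Int) (hm : 0 ≤ m) :
    innerB m total i = total + sB m.toNat i := by
  generalize hN : m.toNat = N
  induction N using Nat.strong_induction_on generalizing m total i with
  | _ N ih =>
    rw [innerB]
    by_cases h : 0 < m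
    · rw [dif_pos h]
      have h10 : PySem.Int.floordiv m 10 = m / 10 := PySem.Int.floordiv_eq_ediv_of_pos (by norm_num)
      have hmod : PySem.Int.mod m 10 = m % 10 := PySem.Int.mod_eq_emod_of_pos (by norm_num)
      have hq : (m / 10).toNat = m.toNat / 10 := by omega
      rw [h10]
      rw [ih ((m / 10).toNat) (by omega) (m / 10)
        (total + PySem.Int.mod m 10 * PySem.List.pyGetD weightsB (PySem.Int.mod i 6) 0)
        (i + 1) (by omega) rfl]
      conv_rhs => rw [← hN, sB]
      rw [if_neg (by omega)]
      have hw : PySem.List.pyGetD weightsB (PySem.Int.mod i 6) 0 = wfn i := rfl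
      rw [hmod, hw, hq]
      have hd : ((m.toNat % 10 : Nat) : Int) = m % 10 := by omega
      rw [hd]
      ring
    · rw [dif_neg h]
      rw [sB, if_pos (by omega)]
      ring

lemma step_eq (n : Int) (hn : 0 ≤ n) : thirtStep n = innerB n 0 0 := by
  rw [innerB_spec n 0 0 hn, thirtStep_eq_sB n hn, zero_add]

lemma loop_eq (f : Nat) (n : Int) (hn : 0 ≤ n) : thirtLoop f n = thirtLoopB f n := by
  induction f generalizing n with
  | zero => rfl
  | succ f ih =>
    show (let output := thirtStep n; if n = output then output else thirtLoop f output) =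
      (let total := innerB n 0 0; if total = n then total else thirtLoopB f total)
    simp only
    rw [← step_eq n hn]
    have hnn : 0 ≤ thirtStep n := by
      rw [thirtStep_eq_sB n hn]; exact sB_nonneg _ _
    by_cases h : n = thirtStep n
    · rw [if_pos h, if_pos h.symm]
    · rw [if_neg h, if_neg (fun hh => h hh.symm), ih (thirtStep n) hnn]

-- ===== VERDICT (by name: the statement is the Claim_ definition above) =====
theorem thirt_spec : Claim_equal_thirt := by
  intro n _ hpre
  unfold Spec_thirt thirt thirt_alt
  exact loop_eq (n.toNat + 1) n hpre
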